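-- pv_equiv track=rewrite | github.com/ramc004/Python_PyCharm_Github | Sixth_Form/Easter Term -Year 12/Board Games for Half Term Project /Snakes and Ladders/Snakes-and-Ladders-to_follow/snakes and ladders (very detailed)/gameplay 2.py | positive_easy_movement
-- ===== SOURCE A (Python) =====
-- easy_board_points = [(620, 580), (0, 0), (80, 0), (160, 0), (240, 0), (320, 0), (400, 0), (400, -80), (320, -80),
--                      (240, -80), (160, -80), (80, -80), (0, -80), (0, -160), (80, -160), (160, -160), (240, -160),
--                      (320, -160), (400, -160), (400, -240), (320, -240), (240, -240), (160, -240), (80, -240),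
--                      (0, -240), (0, -320), (80, -320), (160, -320), (240, -320), (320, -320), (400, -320), (400, -400),
--                      (320, -400), (240, -400), (160, -400), (80, -400), (0, -400)]
--
-- easy_board_rows = [[1, 2, 3, 4, 5, 6], [7, 8, 9, 10, 11, 12], [13, 14, 15, 16, 17, 18], [19, 20, 21, 22, 23, 24],
--                    [25, 26, 27, 28, 29, 30], [31, 32, 33, 34, 35, 36]]
--
-- def current_easy_box(x, y):
--     """Gets the coordinates of the beads on the easy board and returns the box number in which the bead is present.
--     Arguments
--     ---------
--     x : int
--         The x-coordinate of the bead.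
--     y : int
--         The y-coordinate of the bead.
--     Return
--     ------
--     box : int
--         The number of box in which the bead is present."""
--     box = 1
--     for i in easy_board_points:
--         if i[0] <= x < i[0] + 80 and i[1] <= y < i[1] + 80:
--             box = easy_board_points.index(i)
--             break
--     return box
--
-- def positive_easy_movement(x, y):
--     """Gets the coordinates of the beads on the easy board and changes them according to the row and column of the board
--     in which the bead is present. This function is only for the positive values of the token.
--         Arguments
--         ---------
--         x : int
--             The x-coordinate of the bead.
--         y : int
--             The y-coordinate of the bead.
--         Return
--         ------
--         x : int
--             The x-coordinate of the bead.
--         y : int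
--             The y-coordinate of the bead."""
--     row = 0
--     for i in easy_board_rows:
--         if current_easy_box(x, y) in i:
--             row = easy_board_rows.index(i)
--     if current_easy_box(x, y) in [6, 12, 18, 24, 30] and (x == 0 or x == 400):
--         y -= 80
--     else:
--         if row % 2 == 0:
--             x += 5
--         else:
--             x -= 5
--     return x, y
-- ===== SOURCE B (Python) =====
-- def positive_easy_movement(x, y):
--     # Locate the box arithmetically instead of scanning the 37-point list.
--     if 620 <= x < 700 and 580 <= y < 660:
--         box = 0
--     else:
--         c, r = x // 80, -(y // 80)
--         if 0 <= c <= 5 and 0 <= r <= 5: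
--             box = 6 * r + (c + 1 if r % 2 == 0 else 6 - c)
--         else:
--             box = 1
--     row = (box - 1) // 6 if 1 <= box <= 36 else 0
--     if box % 6 == 0 and 0 < box < 36 and (x == 0 or x == 400):
--         return x, y - 80
--     if row % 2 == 0:
--         return x + 5, y
--     return x - 5, y
-- ===== Notes on version B (the rewrite author's own statement) =====
-- stated objective: simpler
-- what changed: B computes the box number by closed-form grid arithmetic (column x//80, row -(y//80)) instead of scanning the 37-point list and calling list.index, derives the row as (box-1)//6 instead of scanning the six row lists with list.index, and replaces the [6,12,18,24,30] membership test with box % 6 == 0 and 0 < box < 36.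
import Mathlib
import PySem

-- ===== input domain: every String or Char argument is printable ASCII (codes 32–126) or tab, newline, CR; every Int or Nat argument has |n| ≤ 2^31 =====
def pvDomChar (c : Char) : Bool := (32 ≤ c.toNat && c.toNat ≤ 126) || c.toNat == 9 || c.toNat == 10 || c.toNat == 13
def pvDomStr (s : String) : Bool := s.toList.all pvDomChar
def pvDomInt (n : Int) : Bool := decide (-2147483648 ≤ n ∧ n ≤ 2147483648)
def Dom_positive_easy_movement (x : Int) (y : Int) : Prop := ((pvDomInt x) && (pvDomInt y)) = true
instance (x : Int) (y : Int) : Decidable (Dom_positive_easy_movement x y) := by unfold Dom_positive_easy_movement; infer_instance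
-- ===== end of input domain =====

-- B replaces A's list scan + index() with closed-form grid arithmetic (objective: simpler).

-- B replaces A's 37-point list scan (+ list.index calls) with closed-form grid arithmetic (objective: simpler).

-- ===== PORT A =====
def easy_board_points : List (Int × Int) :=
  [(620, 580), (0, 0), (80, 0), (160, 0), (240, 0), (320, 0), (400, 0), (400, -80), (320, -80),
   (240, -80), (160, -80), (80, -80), (0, -80), (0, -160), (80, -160), (160, -160), (240, -160),
   (320, -160), (400, -160), (400, -240), (320, -240), (240, -240), (160, -240), (80, -240),
   (0, -240), (0, -320), (80, -320), (160, -320), (240, -320), (320, -320), (400, -320), (400, -400),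
   (320, -400), (240, -400), (160, -400), (80, -400), (0, -400)]

def easy_board_rows : List (List Int) :=
  [[1, 2, 3, 4, 5, 6], [7, 8, 9, 10, 11, 12], [13, 14, 15, 16, 17, 18], [19, 20, 21, 22, 23, 24],
   [25, 26, 27, 28, 29, 30], [31, 32, 33, 34, 35, 36]]

-- Python's 'for … if …: box = points.index(i); break': first matching point, its index (list has no duplicates,
-- so index? is some; getD 0 is unreachable default).
def current_easy_box (x : Int) (y : Int) : Int :=
  match easy_board_points.find? (fun i => decide (i.1 ≤ x ∧ x < i.1 + 80 ∧ i.2 ≤ y ∧ y < i.2 + 80)) with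
  | some i => ((PySem.List.index? easy_board_points i).getD 0 : Nat)
  | none => 1

def positive_easy_movement (x : Int) (y : Int) : Int × Int :=
  let row : Int := easy_board_rows.foldl
    (fun row i => if current_easy_box x y ∈ i then
        (((PySem.List.index? easy_board_rows i).getD 0 : Nat) : Int) else row) 0
  if current_easy_box x y ∈ ([6, 12, 18, 24, 30] : List Int) ∧ (x = 0 ∨ x = 400) then
    (x, y - 80)
  else if PySem.Int.mod row 2 = 0 then (x + 5, y) else (x - 5, y)

-- ===== PORT B =====
def positive_easy_movement_alt (x : Int) (y : Int) : Int × Int :=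
  let box : Int :=
    if 620 ≤ x ∧ x < 700 ∧ 580 ≤ y ∧ y < 660 then 0
    else
      let c := PySem.Int.floordiv x 80
      let r := -(PySem.Int.floordiv y 80)
      if 0 ≤ c ∧ c ≤ 5 ∧ 0 ≤ r ∧ r ≤ 5 then
        6 * r + (if PySem.Int.mod r 2 = 0 then c + 1 else 6 - c)
      else 1
  let row : Int := if 1 ≤ box ∧ box ≤ 36 then PySem.Int.floordiv (box - 1) 6 else 0
  if PySem.Int.mod box 6 = 0 ∧ 0 < box ∧ box < 36 ∧ (x = 0 ∨ x = 400) then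
    (x, y - 80)
  else if PySem.Int.mod row 2 = 0 then (x + 5, y) else (x - 5, y)


-- ===== PRECONDITION & SPEC =====
def Spec_positive_easy_movement (x : Int) (y : Int) (out : Int × Int) : Prop := out = positive_easy_movement_alt x y
instance (x : Int) (y : Int) (out : Int × Int) : Decidable (Spec_positive_easy_movement x y out) := by unfold Spec_positive_easy_movement; infer_instance

-- ===== CLAIM (what is proved, stated in full; the proofs are below) =====
def Claim_equal_positive_easy_movement : Prop := ∀ (x : Int) (y : Int), Dom_positive_easy_movement x y → Spec_positive_easy_movement x y (positive_easy_movement x y)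

-- ===== LEMMAS AND PROOFS =====

-- closed-form box value: mirrors the 'box' let of the alt port (let-free for rewriting)
def boxB (x : Int) (y : Int) : Int :=
  if 620 ≤ x ∧ x < 700 ∧ 580 ≤ y ∧ y < 660 then 0
  else if 0 ≤ PySem.Int.floordiv x 80 ∧ PySem.Int.floordiv x 80 ≤ 5 ∧
      0 ≤ -(PySem.Int.floordiv y 80) ∧ -(PySem.Int.floordiv y 80) ≤ 5 then
    6 * (-(PySem.Int.floordiv y 80)) +
      (if PySem.Int.mod (-(PySem.Int.floordiv y 80)) 2 = 0 then PySem.Int.floordiv x 80 + 1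
       else 6 - PySem.Int.floordiv x 80)
  else 1

theorem box_eq (x y : Int) : current_easy_box x y = boxB x y := by
  have h80 : (0:Int) < 80 := by norm_num
  have h2 : (0:Int) < 2 := by norm_num
  unfold current_easy_box
  rcases hfind : easy_board_points.find?
      (fun i => decide (i.1 ≤ x ∧ x < i.1 + 80 ∧ i.2 ≤ y ∧ y < i.2 + 80)) with _ | p
  · simp only [hfind]
    unfold boxB
    rw [PySem.Int.floordiv_eq_ediv_of_pos h80, PySem.Int.floordiv_eq_ediv_of_pos h80,
      PySem.Int.mod_eq_emod_of_pos h2]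
    have hgrid : (0 ≤ x / 80 ∧ x / 80 ≤ 5 ∧ 0 ≤ -(y / 80) ∧ -(y / 80) ≤ 5) → False := by
      intro hB
      have hcx : x / 80 = 0 ∨ x / 80 = 1 ∨ x / 80 = 2 ∨ x / 80 = 3 ∨ x / 80 = 4 ∨ x / 80 = 5 := by omega
      have hcy : y / 80 = 0 ∨ y / 80 = -1 ∨ y / 80 = -2 ∨ y / 80 = -3 ∨ y / 80 = -4 ∨ y / 80 = -5 := by omega
      rcases hcx with hx|hx|hx|hx|hx|hx <;> rcases hcy with hy|hy|hy|hy|hy|hy <;>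
      · have h0 := List.find?_eq_none.mp hfind (80 * (x / 80), 80 * (y / 80))
          (by rw [hx, hy]; decide)
        simp only [decide_eq_true_eq] at h0
        omega
    split_ifs with hA
    all_goals first
      | rfl
      | exact absurd hB hgrid
      | (exfalso
         have h0 := List.find?_eq_none.mp hfind (620, 580) (by norm_num [easy_board_points])
         simp only [decide_eq_true_eq] at h0
         omega)
  · simp only [hfind]
    have hp : p ∈ easy_board_points := List.mem_of_find?_eq_some hfind
    have hc := List.find?_some hfind
    simp only [easy_board_points, List.mem_cons, List.not_mem_nil, or_false] at hp
    rcases hp with h|h|h|h|h|h|h|h|h|h|h|h|h|h|h|h|h|h|h|h|h|h|h|h|h|h|h|h|h|h|h|h|h|h|h|h|h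
    · subst h
      rw [show (↑((PySem.List.index? easy_board_points ((620:Int), (580:Int))).getD 0) : Int) = (0:Int) from by decide]
      simp only [decide_eq_true_eq] at hc
      unfold boxB
      rw [PySem.Int.floordiv_eq_ediv_of_pos h80, PySem.Int.floordiv_eq_ediv_of_pos h80,
        PySem.Int.mod_eq_emod_of_pos h2]
      split_ifs <;> omega
    · subst h
      rw [show (↑((PySem.List.index? easy_board_points ((0:Int), (0:Int))).getD 0) : Int) = (1:Int) from by decide]
      simp only [decide_eq_true_eq] at hc
      unfold boxB
      rw [PySem.Int.floordiv_eq_ediv_of_pos h80, PySem.Int.floordiv_eq_ediv_of_pos h80,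
        PySem.Int.mod_eq_emod_of_pos h2]
      split_ifs <;> omega
    · subst h
      rw [show (↑((PySem.List.index? easy_board_points ((80:Int), (0:Int))).getD 0) : Int) = (2:Int) from by decide]
      simp only [decide_eq_true_eq] at hc
      unfold boxB
      rw [PySem.Int.floordiv_eq_ediv_of_pos h80, PySem.Int.floordiv_eq_ediv_of_pos h80,
        PySem.Int.mod_eq_emod_of_pos h2]
      split_ifs <;> omega
    · subst h
      rw [show (↑((PySem.List.index? easy_board_points ((160:Int), (0:Int))).getD 0) : Int) = (3:Int) from by decide]
      simp only [decide_eq_true_eq] at hc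
      unfold boxB
      rw [PySem.Int.floordiv_eq_ediv_of_pos h80, PySem.Int.floordiv_eq_ediv_of_pos h80,
        PySem.Int.mod_eq_emod_of_pos h2]
      split_ifs <;> omega
    · subst h
      rw [show (↑((PySem.List.index? easy_board_points ((240:Int), (0:Int))).getD 0) : Int) = (4:Int) from by decide]
      simp only [decide_eq_true_eq] at hc
      unfold boxB
      rw [PySem.Int.floordiv_eq_ediv_of_pos h80, PySem.Int.floordiv_eq_ediv_of_pos h80,
        PySem.Int.mod_eq_emod_of_pos h2]
      split_ifs <;> omega
    · subst h
      rw [show (↑((PySem.List.index? easy_board_points ((320:Int), (0:Int))).getD 0) : Int) = (5:Int) from by decide]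
      simp only [decide_eq_true_eq] at hc
      unfold boxB
      rw [PySem.Int.floordiv_eq_ediv_of_pos h80, PySem.Int.floordiv_eq_ediv_of_pos h80,
        PySem.Int.mod_eq_emod_of_pos h2]
      split_ifs <;> omega
    · subst h
      rw [show (↑((PySem.List.index? easy_board_points ((400:Int), (0:Int))).getD 0) : Int) = (6:Int) from by decide]
      simp only [decide_eq_true_eq] at hc
      unfold boxB
      rw [PySem.Int.floordiv_eq_ediv_of_pos h80, PySem.Int.floordiv_eq_ediv_of_pos h80,
        PySem.Int.mod_eq_emod_of_pos h2]
      split_ifs <;> omega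
    · subst h
      rw [show (↑((PySem.List.index? easy_board_points ((400:Int), (-80:Int))).getD 0) : Int) = (7:Int) from by decide]
      simp only [decide_eq_true_eq] at hc
      unfold boxB
      rw [PySem.Int.floordiv_eq_ediv_of_pos h80, PySem.Int.floordiv_eq_ediv_of_pos h80,
        PySem.Int.mod_eq_emod_of_pos h2]
      split_ifs <;> omega
    · subst h
      rw [show (↑((PySem.List.index? easy_board_points ((320:Int), (-80:Int))).getD 0) : Int) = (8:Int) from by decide]
      simp only [decide_eq_true_eq] at hc
      unfold boxB
      rw [PySem.Int.floordiv_eq_ediv_of_pos h80, PySem.Int.floordiv_eq_ediv_of_pos h80,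
        PySem.Int.mod_eq_emod_of_pos h2]
      split_ifs <;> omega
    · subst h
      rw [show (↑((PySem.List.index? easy_board_points ((240:Int), (-80:Int))).getD 0) : Int) = (9:Int) from by decide]
      simp only [decide_eq_true_eq] at hc
      unfold boxB
      rw [PySem.Int.floordiv_eq_ediv_of_pos h80, PySem.Int.floordiv_eq_ediv_of_pos h80,
        PySem.Int.mod_eq_emod_of_pos h2]
      split_ifs <;> omega
    · subst h
      rw [show (↑((PySem.List.index? easy_board_points ((160:Int), (-80:Int))).getD 0) : Int) = (10:Int) from by decide]
      simp only [decide_eq_true_eq] at hc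
      unfold boxB
      rw [PySem.Int.floordiv_eq_ediv_of_pos h80, PySem.Int.floordiv_eq_ediv_of_pos h80,
        PySem.Int.mod_eq_emod_of_pos h2]
      split_ifs <;> omega
    · subst h
      rw [show (↑((PySem.List.index? easy_board_points ((80:Int), (-80:Int))).getD 0) : Int) = (11:Int) from by decide]
      simp only [decide_eq_true_eq] at hc
      unfold boxB
      rw [PySem.Int.floordiv_eq_ediv_of_pos h80, PySem.Int.floordiv_eq_ediv_of_pos h80,
        PySem.Int.mod_eq_emod_of_pos h2]
      split_ifs <;> omega
    · subst h
      rw [show (↑((PySem.List.index? easy_board_points ((0:Int), (-80:Int))).getD 0) : Int) = (12:Int) from by decide]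
      simp only [decide_eq_true_eq] at hc
      unfold boxB
      rw [PySem.Int.floordiv_eq_ediv_of_pos h80, PySem.Int.floordiv_eq_ediv_of_pos h80,
        PySem.Int.mod_eq_emod_of_pos h2]
      split_ifs <;> omega
    · subst h
      rw [show (↑((PySem.List.index? easy_board_points ((0:Int), (-160:Int))).getD 0) : Int) = (13:Int) from by decide]
      simp only [decide_eq_true_eq] at hc
      unfold boxB
      rw [PySem.Int.floordiv_eq_ediv_of_pos h80, PySem.Int.floordiv_eq_ediv_of_pos h80,
        PySem.Int.mod_eq_emod_of_pos h2]
      split_ifs <;> omega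
    · subst h
      rw [show (↑((PySem.List.index? easy_board_points ((80:Int), (-160:Int))).getD 0) : Int) = (14:Int) from by decide]
      simp only [decide_eq_true_eq] at hc
      unfold boxB
      rw [PySem.Int.floordiv_eq_ediv_of_pos h80, PySem.Int.floordiv_eq_ediv_of_pos h80,
        PySem.Int.mod_eq_emod_of_pos h2]
      split_ifs <;> omega
    · subst h
      rw [show (↑((PySem.List.index? easy_board_points ((160:Int), (-160:Int))).getD 0) : Int) = (15:Int) from by decide]
      simp only [decide_eq_true_eq] at hc
      unfold boxB
      rw [PySem.Int.floordiv_eq_ediv_of_pos h80, PySem.Int.floordiv_eq_ediv_of_pos h80,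
        PySem.Int.mod_eq_emod_of_pos h2]
      split_ifs <;> omega
    · subst h
      rw [show (↑((PySem.List.index? easy_board_points ((240:Int), (-160:Int))).getD 0) : Int) = (16:Int) from by decide]
      simp only [decide_eq_true_eq] at hc
      unfold boxB
      rw [PySem.Int.floordiv_eq_ediv_of_pos h80, PySem.Int.floordiv_eq_ediv_of_pos h80,
        PySem.Int.mod_eq_emod_of_pos h2]
      split_ifs <;> omega
    · subst h
      rw [show (↑((PySem.List.index? easy_board_points ((320:Int), (-160:Int))).getD 0) : Int) = (17:Int) from by decide]
      simp only [decide_eq_true_eq] at hc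
      unfold boxB
      rw [PySem.Int.floordiv_eq_ediv_of_pos h80, PySem.Int.floordiv_eq_ediv_of_pos h80,
        PySem.Int.mod_eq_emod_of_pos h2]
      split_ifs <;> omega
    · subst h
      rw [show (↑((PySem.List.index? easy_board_points ((400:Int), (-160:Int))).getD 0) : Int) = (18:Int) from by decide]
      simp only [decide_eq_true_eq] at hc
      unfold boxB
      rw [PySem.Int.floordiv_eq_ediv_of_pos h80, PySem.Int.floordiv_eq_ediv_of_pos h80,
        PySem.Int.mod_eq_emod_of_pos h2]
      split_ifs <;> omega
    · subst h
      rw [show (↑((PySem.List.index? easy_board_points ((400:Int), (-240:Int))).getD 0) : Int) = (19:Int) from by decide]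
      simp only [decide_eq_true_eq] at hc
      unfold boxB
      rw [PySem.Int.floordiv_eq_ediv_of_pos h80, PySem.Int.floordiv_eq_ediv_of_pos h80,
        PySem.Int.mod_eq_emod_of_pos h2]
      split_ifs <;> omega
    · subst h
      rw [show (↑((PySem.List.index? easy_board_points ((320:Int), (-240:Int))).getD 0) : Int) = (20:Int) from by decide]
      simp only [decide_eq_true_eq] at hc
      unfold boxB
      rw [PySem.Int.floordiv_eq_ediv_of_pos h80, PySem.Int.floordiv_eq_ediv_of_pos h80,
        PySem.Int.mod_eq_emod_of_pos h2]
      split_ifs <;> omega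
    · subst h
      rw [show (↑((PySem.List.index? easy_board_points ((240:Int), (-240:Int))).getD 0) : Int) = (21:Int) from by decide]
      simp only [decide_eq_true_eq] at hc
      unfold boxB
      rw [PySem.Int.floordiv_eq_ediv_of_pos h80, PySem.Int.floordiv_eq_ediv_of_pos h80,
        PySem.Int.mod_eq_emod_of_pos h2]
      split_ifs <;> omega
    · subst h
      rw [show (↑((PySem.List.index? easy_board_points ((160:Int), (-240:Int))).getD 0) : Int) = (22:Int) from by decide]
      simp only [decide_eq_true_eq] at hc
      unfold boxB
      rw [PySem.Int.floordiv_eq_ediv_of_pos h80, PySem.Int.floordiv_eq_ediv_of_pos h80,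
        PySem.Int.mod_eq_emod_of_pos h2]
      split_ifs <;> omega
    · subst h
      rw [show (↑((PySem.List.index? easy_board_points ((80:Int), (-240:Int))).getD 0) : Int) = (23:Int) from by decide]
      simp only [decide_eq_true_eq] at hc
      unfold boxB
      rw [PySem.Int.floordiv_eq_ediv_of_pos h80, PySem.Int.floordiv_eq_ediv_of_pos h80,
        PySem.Int.mod_eq_emod_of_pos h2]
      split_ifs <;> omega
    · subst h
      rw [show (↑((PySem.List.index? easy_board_points ((0:Int), (-240:Int))).getD 0) : Int) = (24:Int) from by decide]
      simp only [decide_eq_true_eq] at hc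
      unfold boxB
      rw [PySem.Int.floordiv_eq_ediv_of_pos h80, PySem.Int.floordiv_eq_ediv_of_pos h80,
        PySem.Int.mod_eq_emod_of_pos h2]
      split_ifs <;> omega
    · subst h
      rw [show (↑((PySem.List.index? easy_board_points ((0:Int), (-320:Int))).getD 0) : Int) = (25:Int) from by decide]
      simp only [decide_eq_true_eq] at hc
      unfold boxB
      rw [PySem.Int.floordiv_eq_ediv_of_pos h80, PySem.Int.floordiv_eq_ediv_of_pos h80,
        PySem.Int.mod_eq_emod_of_pos h2]
      split_ifs <;> omega
    · subst h
      rw [show (↑((PySem.List.index? easy_board_points ((80:Int), (-320:Int))).getD 0) : Int) = (26:Int) from by decide]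
      simp only [decide_eq_true_eq] at hc
      unfold boxB
      rw [PySem.Int.floordiv_eq_ediv_of_pos h80, PySem.Int.floordiv_eq_ediv_of_pos h80,
        PySem.Int.mod_eq_emod_of_pos h2]
      split_ifs <;> omega
    · subst h
      rw [show (↑((PySem.List.index? easy_board_points ((160:Int), (-320:Int))).getD 0) : Int) = (27:Int) from by decide]
      simp only [decide_eq_true_eq] at hc
      unfold boxB
      rw [PySem.Int.floordiv_eq_ediv_of_pos h80, PySem.Int.floordiv_eq_ediv_of_pos h80,
        PySem.Int.mod_eq_emod_of_pos h2]
      split_ifs <;> omega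
    · subst h
      rw [show (↑((PySem.List.index? easy_board_points ((240:Int), (-320:Int))).getD 0) : Int) = (28:Int) from by decide]
      simp only [decide_eq_true_eq] at hc
      unfold boxB
      rw [PySem.Int.floordiv_eq_ediv_of_pos h80, PySem.Int.floordiv_eq_ediv_of_pos h80,
        PySem.Int.mod_eq_emod_of_pos h2]
      split_ifs <;> omega
    · subst h
      rw [show (↑((PySem.List.index? easy_board_points ((320:Int), (-320:Int))).getD 0) : Int) = (29:Int) from by decide]
      simp only [decide_eq_true_eq] at hc
      unfold boxB
      rw [PySem.Int.floordiv_eq_ediv_of_pos h80, PySem.Int.floordiv_eq_ediv_of_pos h80,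
        PySem.Int.mod_eq_emod_of_pos h2]
      split_ifs <;> omega
    · subst h
      rw [show (↑((PySem.List.index? easy_board_points ((400:Int), (-320:Int))).getD 0) : Int) = (30:Int) from by decide]
      simp only [decide_eq_true_eq] at hc
      unfold boxB
      rw [PySem.Int.floordiv_eq_ediv_of_pos h80, PySem.Int.floordiv_eq_ediv_of_pos h80,
        PySem.Int.mod_eq_emod_of_pos h2]
      split_ifs <;> omega
    · subst h
      rw [show (↑((PySem.List.index? easy_board_points ((400:Int), (-400:Int))).getD 0) : Int) = (31:Int) from by decide]
      simp only [decide_eq_true_eq] at hc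
      unfold boxB
      rw [PySem.Int.floordiv_eq_ediv_of_pos h80, PySem.Int.floordiv_eq_ediv_of_pos h80,
        PySem.Int.mod_eq_emod_of_pos h2]
      split_ifs <;> omega
    · subst h
      rw [show (↑((PySem.List.index? easy_board_points ((320:Int), (-400:Int))).getD 0) : Int) = (32:Int) from by decide]
      simp only [decide_eq_true_eq] at hc
      unfold boxB
      rw [PySem.Int.floordiv_eq_ediv_of_pos h80, PySem.Int.floordiv_eq_ediv_of_pos h80,
        PySem.Int.mod_eq_emod_of_pos h2]
      split_ifs <;> omega
    · subst h
      rw [show (↑((PySem.List.index? easy_board_points ((240:Int), (-400:Int))).getD 0) : Int) = (33:Int) from by decide]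
      simp only [decide_eq_true_eq] at hc
      unfold boxB
      rw [PySem.Int.floordiv_eq_ediv_of_pos h80, PySem.Int.floordiv_eq_ediv_of_pos h80,
        PySem.Int.mod_eq_emod_of_pos h2]
      split_ifs <;> omega
    · subst h
      rw [show (↑((PySem.List.index? easy_board_points ((160:Int), (-400:Int))).getD 0) : Int) = (34:Int) from by decide]
      simp only [decide_eq_true_eq] at hc
      unfold boxB
      rw [PySem.Int.floordiv_eq_ediv_of_pos h80, PySem.Int.floordiv_eq_ediv_of_pos h80,
        PySem.Int.mod_eq_emod_of_pos h2]
      split_ifs <;> omega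
    · subst h
      rw [show (↑((PySem.List.index? easy_board_points ((80:Int), (-400:Int))).getD 0) : Int) = (35:Int) from by decide]
      simp only [decide_eq_true_eq] at hc
      unfold boxB
      rw [PySem.Int.floordiv_eq_ediv_of_pos h80, PySem.Int.floordiv_eq_ediv_of_pos h80,
        PySem.Int.mod_eq_emod_of_pos h2]
      split_ifs <;> omega
    · subst h
      rw [show (↑((PySem.List.index? easy_board_points ((0:Int), (-400:Int))).getD 0) : Int) = (36:Int) from by decide]
      simp only [decide_eq_true_eq] at hc
      unfold boxB
      rw [PySem.Int.floordiv_eq_ediv_of_pos h80, PySem.Int.floordiv_eq_ediv_of_pos h80,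
        PySem.Int.mod_eq_emod_of_pos h2]
      split_ifs <;> omega

-- the row fold of port A, abstracted over the box value
def rowfold (b : Int) : Int :=
  easy_board_rows.foldl
    (fun row i => if b ∈ i then
        (((PySem.List.index? easy_board_rows i).getD 0 : Nat) : Int) else row) 0

-- port A's body abstracted over the box value (defeq to the port at b = current_easy_box x y)
def ABody (b x y : Int) : Int × Int :=
  if b ∈ ([6, 12, 18, 24, 30] : List Int) ∧ (x = 0 ∨ x = 400) then (x, y - 80)
  else if PySem.Int.mod (rowfold b) 2 = 0 then (x + 5, y) else (x - 5, y)

-- port B's body abstracted over the box value (defeq to the alt port at b = boxB x y)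
def BBody (b x y : Int) : Int × Int :=
  if PySem.Int.mod b 6 = 0 ∧ 0 < b ∧ b < 36 ∧ (x = 0 ∨ x = 400) then (x, y - 80)
  else if PySem.Int.mod (if 1 ≤ b ∧ b ≤ 36 then PySem.Int.floordiv (b - 1) 6 else 0) 2 = 0
    then (x + 5, y) else (x - 5, y)

theorem rowfold_eq (b : Int) (h0 : 0 ≤ b) (h1 : b ≤ 36) :
    rowfold b = if 1 ≤ b ∧ b ≤ 36 then PySem.Int.floordiv (b - 1) 6 else 0 := by
  interval_cases b <;> decide

theorem memb_iff (b : Int) (h0 : 0 ≤ b) (h1 : b ≤ 36) :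
    (b ∈ ([6, 12, 18, 24, 30] : List Int)) ↔ (PySem.Int.mod b 6 = 0 ∧ 0 < b ∧ b < 36) := by
  interval_cases b <;> decide

theorem boxB_range (x y : Int) : 0 ≤ boxB x y ∧ boxB x y ≤ 36 := by
  have h80 : (0:Int) < 80 := by norm_num
  have h2 : (0:Int) < 2 := by norm_num
  unfold boxB
  rw [PySem.Int.floordiv_eq_ediv_of_pos h80, PySem.Int.floordiv_eq_ediv_of_pos h80,
    PySem.Int.mod_eq_emod_of_pos h2]
  split_ifs <;> omega

theorem body_eq (b x y : Int) (h0 : 0 ≤ b) (h1 : b ≤ 36) : ABody b x y = BBody b x y := by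
  unfold ABody BBody
  rw [rowfold_eq b h0 h1]
  simp only [memb_iff b h0 h1, and_assoc]

theorem main_eq (x y : Int) : positive_easy_movement x y = positive_easy_movement_alt x y := by
  have hA : positive_easy_movement x y = ABody (current_easy_box x y) x y := rfl
  have hB : positive_easy_movement_alt x y = BBody (boxB x y) x y := rfl
  rw [hA, hB, box_eq]
  exact body_eq _ x y (boxB_range x y).1 (boxB_range x y).2

-- ===== VERDICT (by name: the statement is the Claim_ definition above) =====
theorem positive_easy_movement_spec : Claim_equal_positive_easy_movement := by
  intro x y _
  unfold Spec_positive_easy_movement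
  exact main_eq x y
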